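-- pv_equiv track=rewrite | github.com/JonSteinn/Kattis-Solutions | src/Coloring Socks/Python 3/main.py | machines_needed
-- ===== SOURCE A (Python) =====
-- def machines_needed(socks,cap,diff,colors):
--     if colors[0]-colors[-1] <= diff and cap >= socks:
--         return 1
--     machines,curr_cap,i,j = (0,cap,0,0)
--     while True:
--         if curr_cap == 0:
--             machines += 1
--             curr_cap = cap
--             i = j
--         elif colors[i]-colors[j] > diff:
--             machines += 1
--             i = j
--             curr_cap = cap
--         elif j < socks-1:
--             j += 1
--             curr_cap -= 1
--         else:
--             return machines + 1
-- ===== SOURCE B (Python) =====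
-- def machines_needed(socks, cap, diff, colors):
--     if colors[0] - colors[-1] <= diff and cap >= socks:
--         return 1
--     machines, i = 0, 0
--     while True:
--         # binary search (colors is non-increasing): first j in [i+1, socks)
--         # with colors[j] < colors[i] - diff, or socks if none
--         lo, hi, x = i + 1, socks, colors[i] - diff
--         while lo < hi:
--             mid = (lo + hi) // 2
--             if colors[mid] < x:
--                 hi = mid
--             else:
--                 lo = mid + 1
--         end = min(lo, i + cap)
--         machines += 1
--         if end >= socks:
--             return machines
--         i = end
-- ===== Notes on version B (the rewrite author's own statement) =====
-- stated objective: alternative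
-- what changed: Replaces A's sock-by-sock state machine (capacity countdown with 4-way branching) by a machine-by-machine loop that locates each machine's end with a binary search over the non-increasing color list (the problem's input contract, stated in Pre_), clamped by capacity.
-- outside the precondition, e.g. on machines_needed(4, 2, 0, [1, 0, 1, 1]): A returns 3, B returns 2; on machines_needed(3, -1, 0, [5, 5, 5]): A returns 1, B raises IndexError
import Mathlib
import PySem

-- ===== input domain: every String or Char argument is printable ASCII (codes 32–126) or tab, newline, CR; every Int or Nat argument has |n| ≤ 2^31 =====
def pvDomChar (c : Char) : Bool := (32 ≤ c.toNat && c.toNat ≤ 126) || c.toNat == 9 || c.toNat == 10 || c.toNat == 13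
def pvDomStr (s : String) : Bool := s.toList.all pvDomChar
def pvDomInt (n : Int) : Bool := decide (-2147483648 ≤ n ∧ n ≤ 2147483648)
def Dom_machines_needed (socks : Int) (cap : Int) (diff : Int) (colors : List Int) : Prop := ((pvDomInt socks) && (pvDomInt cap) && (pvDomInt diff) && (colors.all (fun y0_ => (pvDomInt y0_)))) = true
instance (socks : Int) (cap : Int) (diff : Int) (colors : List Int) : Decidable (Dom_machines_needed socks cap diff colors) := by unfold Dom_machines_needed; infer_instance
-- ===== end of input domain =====

-- B replaces A's sock-by-sock state machine (capacity countdown, 4-way branch) by a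
-- machine-by-machine loop that finds each machine's last sock with a BINARY SEARCH on the
-- non-increasing color list (the problem's input contract, stated in Pre_), clamped by capacity.

-- ===== PORT A =====
-- A's 'while True' ported with fuel; 2*socks.toNat + 4 steps provably suffice on Pre_ (the loop
-- consumes at most two steps per sock index); on fuel exhaustion (unreachable under Pre_) it
-- returns the accumulator.
def loopA (socks cap diff : Int) (colors : List Int) : Nat → Int → Int → Int → Int → Int
  | 0, machines, _, _, _ => machines
  | fuel+1, machines, curr_cap, i, j =>
    if curr_cap = 0 then
      loopA socks cap diff colors fuel (machines + 1) cap j j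
    else if (PySem.List.pyGet? colors i).getD 0 - (PySem.List.pyGet? colors j).getD 0 > diff then
      loopA socks cap diff colors fuel (machines + 1) cap j j
    else if j < socks - 1 then
      loopA socks cap diff colors fuel machines (curr_cap - 1) i (j + 1)
    else
      machines + 1

def machines_needed (socks : Int) (cap : Int) (diff : Int) (colors : List Int) : Int :=
  if (PySem.List.pyGet? colors 0).getD 0 - (PySem.List.pyGet? colors (-1)).getD 0 ≤ diff ∧ socks ≤ cap then 1
  else loopA socks cap diff colors (2 * socks.toNat + 4) 0 cap 0 0

-- ===== PORT B =====
-- Source B's inner hand-written binary search, ported with fuel ((hi - lo).toNat steps provably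
-- suffice: the window shrinks every iteration): first j in [lo, hi) with colors[j] < x, else hi
def bsearchB (colors : List Int) (x : Int) : Nat → Int → Int → Int
  | 0, lo, _ => lo
  | f+1, lo, hi =>
    if lo < hi then
      if (PySem.List.pyGet? colors (PySem.Int.floordiv (lo + hi) 2)).getD 0 < x then
        bsearchB colors x f lo (PySem.Int.floordiv (lo + hi) 2)
      else
        bsearchB colors x f (PySem.Int.floordiv (lo + hi) 2 + 1) hi
    else lo

-- Source B's outer 'while True' (one iteration per machine) ported with fuel; socks.toNat + 1 steps
-- provably suffice on Pre_ (each machine consumes at least one sock); on fuel exhaustion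
-- (unreachable under Pre_) it returns the accumulator.
def loopB (socks cap diff : Int) (colors : List Int) : Nat → Int → Int → Int
  | 0, machines, _ => machines
  | fuel+1, machines, i =>
    let e := min (bsearchB colors ((PySem.List.pyGet? colors i).getD 0 - diff)
                   (socks - (i + 1)).toNat (i + 1) socks)
                 (i + cap)
    if socks ≤ e then machines + 1
    else loopB socks cap diff colors fuel (machines + 1) e

def machines_needed_alt (socks : Int) (cap : Int) (diff : Int) (colors : List Int) : Int :=
  if (PySem.List.pyGet? colors 0).getD 0 - (PySem.List.pyGet? colors (-1)).getD 0 ≤ diff ∧ socks ≤ cap then 1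
  else loopB socks cap diff colors (socks.toNat + 1) 0 0

-- ===== PRECONDITION & SPEC =====
-- Pre_ restricts to the problem's natural domain (nonempty colors sorted non-increasingly — the
-- Kattis input contract B's binary search relies on — cap ≥ 1, diff ≥ 0, socks ≤ len(colors)),
-- plus the inputs where A's opening size/color check returns 1 immediately. Outside it A raises
-- IndexError, loops forever, returns a value that treats a nonpositive capacity as unlimited, or
-- runs its greedy on an unsorted list the problem never supplies.
def Pre_machines_needed (socks : Int) (cap : Int) (diff : Int) (colors : List Int) : Prop :=
  colors ≠ [] ∧
    ((List.Pairwise (fun a b => b ≤ a) colors ∧ 1 ≤ cap ∧ 0 ≤ diff ∧ socks ≤ (colors.length : Int)) ∨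
     ((PySem.List.pyGet? colors 0).getD 0 - (PySem.List.pyGet? colors (-1)).getD 0 ≤ diff ∧ socks ≤ cap))
instance (socks : Int) (cap : Int) (diff : Int) (colors : List Int) : Decidable (Pre_machines_needed socks cap diff colors) := by unfold Pre_machines_needed; infer_instance

def pvWitness_machines_needed : Int × Int × Int × List Int := (4, 2, 1, [5, 4, 3, 1])

def Spec_machines_needed (socks : Int) (cap : Int) (diff : Int) (colors : List Int) (out : Int) : Prop := out = machines_needed_alt socks cap diff colors
instance (socks : Int) (cap : Int) (diff : Int) (colors : List Int) (out : Int) : Decidable (Spec_machines_needed socks cap diff colors out) := by unfold Spec_machines_needed; infer_instance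

-- ===== CLAIM (what is proved, stated in full; the proofs are below) =====
def Claim_equal_machines_needed : Prop := ∀ (socks : Int) (cap : Int) (diff : Int) (colors : List Int), Dom_machines_needed socks cap diff colors → Pre_machines_needed socks cap diff colors → Spec_machines_needed socks cap diff colors (machines_needed socks cap diff colors)

-- ===== LEMMAS AND PROOFS =====

-- proof-side linear scan characterizing where a machine started at i ends (the bridge between
-- A's state machine and B's binary search)
def innerB (socks cap diff : Int) (colors : List Int) (i : Int) (j : Int) : Int :=
  if h : j < socks ∧ j - i < cap ∧
      (PySem.List.pyGet? colors i).getD 0 - (PySem.List.pyGet? colors j).getD 0 ≤ diff then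
    innerB socks cap diff colors i (j + 1)
  else j
termination_by (socks - j).toNat
decreasing_by omega

theorem innerB_ge (socks cap diff : Int) (colors : List Int) (i j : Int) :
    j ≤ innerB socks cap diff colors i j := by
  rw [innerB]
  split
  · rename_i h
    have := innerB_ge socks cap diff colors i (j + 1)
    omega
  · omega
termination_by (socks - j).toNat
decreasing_by omega

-- proof-side outer loop over innerB
def outerB (socks cap diff : Int) (colors : List Int) (machines : Int) (i : Int) : Int :=
  if h : socks ≤ innerB socks cap diff colors i (i + 1) then machines + 1
  else outerB socks cap diff colors (machines + 1) (innerB socks cap diff colors i (i + 1))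
termination_by (socks - i).toNat
decreasing_by
  have := innerB_ge socks cap diff colors i (i + 1)
  omega

-- a fresh machine at j (< socks): outerB at j equals the machine value from scanning at (j, j)
theorem outerB_fresh (socks cap diff : Int) (colors : List Int) (m j : Int)
    (hj : j < socks) (hc : 0 < cap) (hd : 0 ≤ diff) :
    outerB socks cap diff colors m j =
      (if socks ≤ innerB socks cap diff colors j j then m + 1
       else outerB socks cap diff colors (m + 1) (innerB socks cap diff colors j j)) := by
  have h1 : innerB socks cap diff colors j j = innerB socks cap diff colors j (j + 1) := by
    rw [innerB, dif_pos ⟨hj, by omega, by simpa using hd⟩]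
  rw [h1]
  conv_lhs => rw [outerB]
  rw [dite_eq_ite]

-- main simulation: an in-progress machine of A (start s, current sock j, remaining capacity
-- cap - (j - s)) produces the same count as the linear scan from (s, j)
theorem loopA_eq (socks cap diff : Int) (colors : List Int)
    (hd : 0 ≤ diff) (hc : 0 < cap) :
    ∀ (fuel : Nat) (m s j : Int), s ≤ j → j < socks → 0 ≤ cap - (j - s) →
      2 * (socks - j).toNat + 1 ≤ fuel → (s < j → 2 * (socks - j).toNat + 2 ≤ fuel) →
      loopA socks cap diff colors fuel m (cap - (j - s)) s j =
        (if socks ≤ innerB socks cap diff colors s j then m + 1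
         else outerB socks cap diff colors (m + 1) (innerB socks cap diff colors s j)) := by
  intro fuel
  induction fuel with
  | zero => intro m s j hsj hjs hcap hfuel1 hfuel2; omega
  | succ fuel ih =>
    intro m s j hsj hjs hcap hfuel1 hfuel2
    have hk : (socks - j).toNat = (socks - (j + 1)).toNat + 1 := by omega
    by_cases h0 : cap - (j - s) = 0
    · -- capacity exhausted: A opens a fresh machine at j; the scan stops at j
      rw [loopA, if_pos h0]
      have hs : s < j := by omega
      have hstop : innerB socks cap diff colors s j = j := by
        rw [innerB, dif_neg (by omega)]
      rw [hstop, if_neg (by omega)]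
      have hb := hfuel2 hs
      have := ih (m + 1) j j (le_refl j) hjs (by omega) (by omega)
        (fun h => absurd h (lt_irrefl j))
      simp only [sub_self, sub_zero] at this
      rw [this]
      exact (outerB_fresh socks cap diff colors (m + 1) j hjs hc hd).symm
    · rw [loopA, if_neg h0]
      by_cases hcol : (PySem.List.pyGet? colors s).getD 0 - (PySem.List.pyGet? colors j).getD 0 > diff
      · -- color gap too large: A opens a fresh machine at j; the scan stops at j
        rw [if_pos hcol]
        have hs : s < j := by
          rcases lt_or_eq_of_le hsj with h | h
          · exact h
          · exfalso; rw [h] at hcol; omega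
        have hstop : innerB socks cap diff colors s j = j := by
          rw [innerB, dif_neg (by rintro ⟨-, -, h3⟩; omega)]
        rw [hstop, if_neg (by omega)]
        have hb := hfuel2 hs
        have := ih (m + 1) j j (le_refl j) hjs (by omega) (by omega)
          (fun h => absurd h (lt_irrefl j))
        simp only [sub_self, sub_zero] at this
        rw [this]
        exact (outerB_fresh socks cap diff colors (m + 1) j hjs hc hd).symm
      · rw [if_neg hcol]
        by_cases hlast : j < socks - 1
        · -- sock j fits and more socks remain: both sides advance j
          rw [if_pos hlast]
          have hadv : innerB socks cap diff colors s j = innerB socks cap diff colors s (j + 1) := by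
            rw [innerB, dif_pos ⟨by omega, by omega, by omega⟩]
          have heq : cap - (j - s) - 1 = cap - (j + 1 - s) := by omega
          rw [heq, ih m s (j + 1) (by omega) (by omega) (by omega) (by omega) (fun _ => by omega)]
          rw [hadv]
        · -- last sock fits: A returns; the scan runs to socks
          rw [if_neg hlast]
          have h1 : innerB socks cap diff colors s j = innerB socks cap diff colors s (j + 1) := by
            rw [innerB, dif_pos ⟨by omega, by omega, by omega⟩]
          have h2 : innerB socks cap diff colors s (j + 1) = j + 1 := by
            rw [innerB, dif_neg (by rintro ⟨h', -, -⟩; omega)]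
          rw [h1, h2, if_pos (by omega)]

-- a non-increasing list read through pyGet?: later entries are ≤ earlier ones
theorem sorted_getD (colors : List Int)
    (hs : List.Pairwise (fun a b => b ≤ a) colors) (a b : Int)
    (h0 : 0 ≤ a) (hab : a ≤ b) (hb : b < (colors.length : Int)) :
    (PySem.List.pyGet? colors b).getD 0 ≤ (PySem.List.pyGet? colors a).getD 0 := by
  rw [PySem.List.pyGet?_eq_some_getElem colors (by omega) hb,
      PySem.List.pyGet?_eq_some_getElem colors h0 (by omega)]
  simp only [Option.getD_some]
  rcases lt_or_eq_of_le hab with h | h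
  · exact (List.pairwise_iff_getElem.mp hs) a.toNat b.toNat (by omega) (by omega) (by omega)
  · simp [h]

-- binary-search correctness on a non-increasing list: bsearchB returns the first index r in
-- [lo, hi) with colors[r] < x (or hi), i.e. x ≤ colors on [lo, r) and colors < x on [r, hi)
theorem bsearchB_spec (colors : List Int) (x : Int)
    (hs : List.Pairwise (fun a b => b ≤ a) colors) :
    ∀ (n : Nat) (lo hi : Int), (hi - lo).toNat ≤ n → 0 ≤ lo → lo ≤ hi →
      hi ≤ (colors.length : Int) →
      lo ≤ bsearchB colors x n lo hi ∧ bsearchB colors x n lo hi ≤ hi ∧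
      (∀ k, lo ≤ k → k < bsearchB colors x n lo hi → x ≤ (PySem.List.pyGet? colors k).getD 0) ∧
      (∀ k, bsearchB colors x n lo hi ≤ k → k < hi → (PySem.List.pyGet? colors k).getD 0 < x) := by
  intro n
  induction n with
  | zero =>
    intro lo hi hn h0 hlh hlen
    have hlo : hi = lo := by omega
    rw [bsearchB]
    exact ⟨le_refl lo, hlh, fun k hk1 hk2 => by omega, fun k hk1 hk2 => by omega⟩
  | succ n ih =>
    intro lo hi hn h0 hlh hlen
    by_cases hlt : lo < hi
    · rw [bsearchB, if_pos hlt]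
      have hm1 : lo ≤ PySem.Int.floordiv (lo + hi) 2 :=
        (PySem.Int.floordiv_two_mid_bounds (le_of_lt hlt)).1
      have hm2 : PySem.Int.floordiv (lo + hi) 2 < hi := by
        rw [PySem.Int.floordiv_lt_iff_lt_mul (by omega)]; omega
      by_cases hx : (PySem.List.pyGet? colors (PySem.Int.floordiv (lo + hi) 2)).getD 0 < x
      · rw [if_pos hx]
        obtain ⟨r1, r2, r3, r4⟩ :=
          ih lo (PySem.Int.floordiv (lo + hi) 2) (by omega) h0 (by omega) (by omega)
        refine ⟨r1, by omega, r3, fun k hk1 hk2 => ?_⟩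
        by_cases hkm : k < PySem.Int.floordiv (lo + hi) 2
        · exact r4 k hk1 hkm
        · have := sorted_getD colors hs (PySem.Int.floordiv (lo + hi) 2) k
            (by omega) (by omega) (by omega)
          omega
      · rw [if_neg hx]
        obtain ⟨r1, r2, r3, r4⟩ :=
          ih (PySem.Int.floordiv (lo + hi) 2 + 1) hi (by omega) (by omega) (by omega) hlen
        refine ⟨by omega, r2, fun k hk1 hk2 => ?_, r4⟩
        by_cases hkm : PySem.Int.floordiv (lo + hi) 2 + 1 ≤ k
        · exact r3 k hkm hk2
        · have := sorted_getD colors hs k (PySem.Int.floordiv (lo + hi) 2)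
            (by omega) (by omega) (by omega)
          omega
    · rw [bsearchB, if_neg hlt]
      exact ⟨le_refl lo, hlh, fun k hk1 hk2 => by omega, fun k hk1 hk2 => by omega⟩

-- running the scan inside the window characterized by the binary search lands on its clamped end
theorem innerB_run (socks cap diff : Int) (colors : List Int) (s r : Int)
    (hr1 : s + 1 ≤ r) (hr2 : r ≤ socks)
    (hok : ∀ k, s + 1 ≤ k → k < r →
      (PySem.List.pyGet? colors s).getD 0 - (PySem.List.pyGet? colors k).getD 0 ≤ diff)
    (hbad : ∀ k, r ≤ k → k < socks →
      diff < (PySem.List.pyGet? colors s).getD 0 - (PySem.List.pyGet? colors k).getD 0)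
    (j : Int) (hj1 : s + 1 ≤ j) (hj2 : j ≤ min r (s + cap)) :
    innerB socks cap diff colors s j = min r (s + cap) := by
  rw [innerB]
  by_cases hcont : j < socks ∧ j - s < cap ∧
      (PySem.List.pyGet? colors s).getD 0 - (PySem.List.pyGet? colors j).getD 0 ≤ diff
  · rw [dif_pos hcont]
    have hjr : j < r := by
      by_contra hc
      exact absurd hcont.2.2 (by have := hbad j (by omega) hcont.1; omega)
    exact innerB_run socks cap diff colors s r hr1 hr2 hok hbad (j + 1) (by omega)
      (by omega)
  · rw [dif_neg hcont]
    by_cases hjm : j < min r (s + cap)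
    · exact absurd ⟨by omega, by omega, hok j hj1 (by omega)⟩ hcont
    · omega
termination_by (min r (s + cap) - j).toNat
decreasing_by omega

-- the scan equals the binary-search end clamped by capacity
theorem innerB_eq_bsearch (socks cap diff : Int) (colors : List Int)
    (hs : List.Pairwise (fun a b => b ≤ a) colors)
    (hc : 1 ≤ cap) (hlen : socks ≤ (colors.length : Int)) (s : Int)
    (h0 : 0 ≤ s) (hss : s < socks) :
    innerB socks cap diff colors s (s + 1) =
      min (bsearchB colors ((PySem.List.pyGet? colors s).getD 0 - diff)
            (socks - (s + 1)).toNat (s + 1) socks)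
          (s + cap) := by
  obtain ⟨r1, r2, r3, r4⟩ := bsearchB_spec colors ((PySem.List.pyGet? colors s).getD 0 - diff)
    hs (socks - (s + 1)).toNat (s + 1) socks (le_refl _) (by omega) (by omega) hlen
  exact innerB_run socks cap diff colors s _ r1 r2
    (fun k hk1 hk2 => by have := r3 k hk1 hk2; omega)
    (fun k hk1 hk2 => by have := r4 k hk1 hk2; omega)
    (s + 1) (le_refl _) (by omega)

-- the proof-side outer loop equals B's fueled loop
theorem outerB_eq_loopB (socks cap diff : Int) (colors : List Int)
    (hs : List.Pairwise (fun a b => b ≤ a) colors)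
    (hc : 1 ≤ cap) (hlen : socks ≤ (colors.length : Int)) :
    ∀ (fuel : Nat) (m i : Int), 0 ≤ i → i < socks → (socks - i).toNat + 1 ≤ fuel + 1 →
      outerB socks cap diff colors m i = loopB socks cap diff colors (fuel + 1) m i := by
  intro fuel
  induction fuel with
  | zero => intro m i h0 hi hf; exfalso; omega
  | succ fuel ih =>
    intro m i h0 hi hf
    have he : innerB socks cap diff colors i (i + 1) =
        min (bsearchB colors ((PySem.List.pyGet? colors i).getD 0 - diff)
              (socks - (i + 1)).toNat (i + 1) socks)
            (i + cap) :=
      innerB_eq_bsearch socks cap diff colors hs hc hlen i h0 hi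
    have hge : i + 1 ≤ innerB socks cap diff colors i (i + 1) :=
      innerB_ge socks cap diff colors i (i + 1)
    rw [loopB]
    simp only [← he]
    conv_lhs => rw [outerB]
    rw [dite_eq_ite]
    by_cases hend : socks ≤ innerB socks cap diff colors i (i + 1)
    · rw [if_pos hend, if_pos hend]
    · rw [if_neg hend, if_neg hend]
      exact ih (m + 1) (innerB socks cap diff colors i (i + 1)) (by omega) (by omega)
        (by omega)

-- ===== VERDICT (by name: the statement is the Claim_ definition above) =====
theorem machines_needed_spec : Claim_equal_machines_needed := by
  intro socks cap diff colors _ hpre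
  unfold Spec_machines_needed machines_needed machines_needed_alt
  by_cases hg : (PySem.List.pyGet? colors 0).getD 0 - (PySem.List.pyGet? colors (-1)).getD 0 ≤ diff ∧ socks ≤ cap
  · rw [if_pos hg, if_pos hg]
  · rw [if_neg hg, if_neg hg]
    obtain ⟨-, h | h⟩ := hpre
    · obtain ⟨hsort, hc, hd, hlen⟩ := h
      by_cases hs : 0 < socks
      · have hA := loopA_eq socks cap diff colors hd (by omega) (2 * socks.toNat + 4)
          0 0 0 (le_refl 0) hs (by omega) (by omega) (fun h' => absurd h' (lt_irrefl 0))
        simp only [sub_zero] at hA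
        rw [hA]
        have hO := (outerB_fresh socks cap diff colors 0 0 hs (by omega) hd).symm
        rw [hO]
        have hfuel : (socks - 0).toNat + 1 ≤ socks.toNat + 1 := by omega
        have := outerB_eq_loopB socks cap diff colors hsort hc hlen socks.toNat 0 0
          (le_refl 0) hs (by omega)
        rw [← this]
      · -- socks ≤ 0: both sides return 1 after one step
        rw [loopA, if_neg (by omega), if_neg (by simp only [sub_self]; omega),
          if_neg (by omega)]
        have hfuel : socks.toNat + 1 = 1 := by omega
        rw [hfuel, loopB]
        have hb : bsearchB colors ((PySem.List.pyGet? colors 0).getD 0 - diff)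
            (socks - (0 + 1)).toNat (0 + 1) socks = 0 + 1 := by
          rw [show (socks - (0 + 1)).toNat = 0 from by omega, bsearchB]
        simp only [hb]
        rw [if_pos (by omega)]
    · exact absurd h hg
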